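-- pv_equiv track=rewrite | github.com/broadinstitute/broad-nnfc-hiPSC-to-EC | analyses/2025-10-09_inner_primers_usage/check_inner_primer_usage.py | find_primer_in_sequence_optimized
-- ===== SOURCE A (Python) =====
-- def find_primer_in_sequence_optimized(sequence, primer_to_gene, min_len, max_len, search_3_prime=False):
--     """Find primer using dictionary lookup with variable primer lengths."""
--     if not sequence:
--         return None
--
--     # Try different primer lengths from min to max
--     for primer_len in range(min_len, min(max_len + 1, len(sequence) + 1)):
--         if search_3_prime:
--             seq_region = sequence[-primer_len:]
--         else:
--             seq_region = sequence[:primer_len]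
--
--         if seq_region in primer_to_gene:
--             return seq_region
--
--     return None
-- ===== SOURCE B (Python) =====
-- def find_primer_in_sequence_optimized(sequence, primer_to_gene, min_len, max_len, search_3_prime=False):
--     """Scan the primer keys once; return the shortest key within the length
--     bounds that matches the relevant end of the sequence (None if no match)."""
--     best = None
--     for primer in primer_to_gene:
--         n = len(primer)
--         if n < min_len or n > max_len:
--             continue
--         matched = sequence.endswith(primer) if search_3_prime else sequence.startswith(primer)
--         if matched and (best is None or n < len(best)):
--             best = primer
--     return best
-- ===== Notes on version B (the rewrite author's own statement) =====
-- stated objective: alternative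
-- what changed: B drops A's probe-the-dict-at-each-candidate-length loop and instead scans the primer keys once, keeping the shortest key inside the length bounds that matches the relevant end of the sequence.
-- outside the precondition, e.g. on find_primer_in_sequence_optimized('abc', {'a': 'g', 'ab': 'h'}, -1, 3, False): A returns 'ab', B returns 'a'
import Mathlib
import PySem

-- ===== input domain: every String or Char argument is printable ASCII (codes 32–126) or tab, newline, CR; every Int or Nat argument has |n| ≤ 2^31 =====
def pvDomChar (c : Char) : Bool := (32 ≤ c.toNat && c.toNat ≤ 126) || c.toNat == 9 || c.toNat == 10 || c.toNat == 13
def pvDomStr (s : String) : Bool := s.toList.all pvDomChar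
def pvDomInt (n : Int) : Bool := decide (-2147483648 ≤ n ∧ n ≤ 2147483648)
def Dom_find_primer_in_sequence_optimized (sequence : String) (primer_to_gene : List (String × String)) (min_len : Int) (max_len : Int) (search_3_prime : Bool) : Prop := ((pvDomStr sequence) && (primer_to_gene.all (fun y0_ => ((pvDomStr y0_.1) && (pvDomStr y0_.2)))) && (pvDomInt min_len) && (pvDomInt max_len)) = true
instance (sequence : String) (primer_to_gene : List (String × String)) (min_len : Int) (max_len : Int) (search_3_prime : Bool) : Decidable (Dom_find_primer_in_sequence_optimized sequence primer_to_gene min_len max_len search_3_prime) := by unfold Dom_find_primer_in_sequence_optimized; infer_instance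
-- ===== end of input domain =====

-- B replaces A's probe-the-dict-at-each-candidate-length loop by a single scan over the
-- primer keys keeping the shortest in-bounds key matching the relevant end of the sequence
-- (alternative decomposition, not claimed faster).

-- ===== PORT A =====
def pvRegion (sequence : String) (search_3_prime : Bool) (primer_len : Int) : String :=
  if search_3_prime then PySem.Str.slice sequence (some (-primer_len)) none
  else PySem.Str.slice sequence none (some primer_len)

def pvFindLoop (sequence : String) (primer_to_gene : List (String × String)) (search_3_prime : Bool) : List Int → Option String
  | [] => none
  | primer_len :: rest =>
    let seq_region := pvRegion sequence search_3_prime primer_len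
    if primer_to_gene.any (fun kv => kv.1 == seq_region) then some seq_region
    else pvFindLoop sequence primer_to_gene search_3_prime rest

def find_primer_in_sequence_optimized (sequence : String) (primer_to_gene : List (String × String)) (min_len : Int) (max_len : Int) (search_3_prime : Bool) : Option String :=
  if sequence = "" then none
  else pvFindLoop sequence primer_to_gene search_3_prime
    (PySem.List.pyRange min_len (min (max_len + 1) (PySem.Str.len sequence + 1)) 1)

-- ===== PORT B =====
def pvStep (sequence : String) (min_len : Int) (max_len : Int) (search_3_prime : Bool) (best : Option String) (kv : String × String) : Option String :=
  let n := PySem.Str.len kv.1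
  if n < min_len || n > max_len then best
  else
    let matched := if search_3_prime then PySem.Str.endswith sequence kv.1 else PySem.Str.startswith sequence kv.1
    if matched then
      match best with
      | none => some kv.1
      | some b => if n < PySem.Str.len b then some kv.1 else best
    else best

def find_primer_in_sequence_optimized_alt (sequence : String) (primer_to_gene : List (String × String)) (min_len : Int) (max_len : Int) (search_3_prime : Bool) : Option String :=
  primer_to_gene.foldl (pvStep sequence min_len max_len search_3_prime) none

-- ===== PRECONDITION & SPEC =====
-- Pre_ restricts to positive min_len, the natural domain of primer lengths: for
-- min_len ≤ 0 Python's zero/negative slice wraparound makes A probe accidental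
-- regions of the sequence (e.g. sequence[:-1]) rather than candidate primer lengths.
def Pre_find_primer_in_sequence_optimized (sequence : String) (primer_to_gene : List (String × String)) (min_len : Int) (max_len : Int) (search_3_prime : Bool) : Prop := 1 ≤ min_len
instance (sequence : String) (primer_to_gene : List (String × String)) (min_len : Int) (max_len : Int) (search_3_prime : Bool) : Decidable (Pre_find_primer_in_sequence_optimized sequence primer_to_gene min_len max_len search_3_prime) := by unfold Pre_find_primer_in_sequence_optimized; infer_instance

def pvWitness_find_primer_in_sequence_optimized : String × (List (String × String)) × Int × Int × Bool := ("ACGT", [("AC", "geneX")], 1, 4, false)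

def Spec_find_primer_in_sequence_optimized (sequence : String) (primer_to_gene : List (String × String)) (min_len : Int) (max_len : Int) (search_3_prime : Bool) (out : Option String) : Prop := out = find_primer_in_sequence_optimized_alt sequence primer_to_gene min_len max_len search_3_prime
instance (sequence : String) (primer_to_gene : List (String × String)) (min_len : Int) (max_len : Int) (search_3_prime : Bool) (out : Option String) : Decidable (Spec_find_primer_in_sequence_optimized sequence primer_to_gene min_len max_len search_3_prime out) := by unfold Spec_find_primer_in_sequence_optimized; infer_instance

-- ===== CLAIM (what is proved, stated in full; the proofs are below) =====
def Claim_equal_find_primer_in_sequence_optimized : Prop := ∀ (sequence : String) (primer_to_gene : List (String × String)) (min_len : Int) (max_len : Int) (search_3_prime : Bool), Dom_find_primer_in_sequence_optimized sequence primer_to_gene min_len max_len search_3_prime → Pre_find_primer_in_sequence_optimized sequence primer_to_gene min_len max_len search_3_prime → Spec_find_primer_in_sequence_optimized sequence primer_to_gene min_len max_len search_3_prime (find_primer_in_sequence_optimized sequence primer_to_gene min_len max_len search_3_prime)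

-- ===== LEMMAS AND PROOFS =====

theorem pv_witness_ok : Dom_find_primer_in_sequence_optimized (pvWitness_find_primer_in_sequence_optimized.1) (pvWitness_find_primer_in_sequence_optimized.2.1) (pvWitness_find_primer_in_sequence_optimized.2.2.1) (pvWitness_find_primer_in_sequence_optimized.2.2.2.1) (pvWitness_find_primer_in_sequence_optimized.2.2.2.2) ∧ Pre_find_primer_in_sequence_optimized (pvWitness_find_primer_in_sequence_optimized.1) (pvWitness_find_primer_in_sequence_optimized.2.1) (pvWitness_find_primer_in_sequence_optimized.2.2.1) (pvWitness_find_primer_in_sequence_optimized.2.2.2.1) (pvWitness_find_primer_in_sequence_optimized.2.2.2.2) := by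
  constructor <;> decide

-- the boolean "this key is acceptable for B" test
def pvOk (sequence : String) (min_len : Int) (max_len : Int) (search_3_prime : Bool) (p : String) : Bool :=
  (!(PySem.Str.len p < min_len || PySem.Str.len p > max_len)) &&
  (if search_3_prime then PySem.Str.endswith sequence p else PySem.Str.startswith sequence p)

-- the char-list that A's slice denotes at a positive in-range length
def pvTgt (sequence : String) (search_3_prime : Bool) (k : Nat) : List Char :=
  if search_3_prime then sequence.toList.drop (sequence.toList.length - k) else sequence.toList.take k

theorem pv_str_toList_inj {a b : String} (h : a.toList = b.toList) : a = b :=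
  String.toList_inj.mp h

theorem pv_step_eq (s : String) (ml Ml : Int) (sp : Bool) (best : Option String) (kv : String × String) :
    pvStep s ml Ml sp best kv =
      if pvOk s ml Ml sp kv.1 then
        (match best with
         | none => some kv.1
         | some b => if PySem.Str.len kv.1 < PySem.Str.len b then some kv.1 else best)
      else best := by
  unfold pvStep pvOk
  cases hb : (PySem.Str.len kv.1 < ml || PySem.Str.len kv.1 > Ml) <;>
    cases hm : (if sp then PySem.Str.endswith s kv.1 else PySem.Str.startswith s kv.1) <;>
      simp [hb, hm] <;> (intros; exfalso; simp at hb; omega)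

theorem pv_ok_iff (s : String) (ml Ml : Int) (sp : Bool) (p : String) :
    pvOk s ml Ml sp p = true ↔
      ml ≤ (p.toList.length : Int) ∧ (p.toList.length : Int) ≤ Ml ∧
        p.toList = pvTgt s sp p.toList.length := by
  unfold pvOk pvTgt
  cases sp <;>
    simp [PySem.Chars.startswith_iff, PySem.Chars.endswith_iff,
      List.prefix_iff_eq_take, List.suffix_iff_eq_drop, and_assoc]

theorem pv_ok_le (s : String) (ml Ml : Int) (sp : Bool) (p : String) (h : pvOk s ml Ml sp p = true) :
    p.toList.length ≤ s.toList.length := by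
  have h2 := (pv_ok_iff s ml Ml sp p).mp h
  have hlen := congrArg List.length h2.2.2
  unfold pvTgt at hlen
  cases sp <;>
    simp only [Bool.false_eq_true, ite_true, ite_false, List.length_take, List.length_drop] at hlen <;>
    omega

theorem pv_region_toList (s : String) (sp : Bool) (k : Int) (h1 : 1 ≤ k) (h2 : k ≤ (s.toList.length : Int)) :
    (pvRegion s sp k).toList = pvTgt s sp k.toNat := by
  unfold pvRegion pvTgt
  have hk : k = ((k.toNat : Nat) : Int) := by omega
  cases sp <;> simp only [Bool.false_eq_true, ite_true, ite_false]
  · rw [PySem.Str.toList_slice]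
    exact PySem.List.slice_to _ (by omega)
  · rw [PySem.Str.toList_slice]
    have hs : PySem.Chars.slice s.toList (some (-k)) none
        = s.toList.drop (PySem.List.clampIdx s.toList.length (-k)) :=
      PySem.List.slice_some_none _ _
    rw [hs, hk, PySem.List.clampIdx_neg_natCast s.toList.length k.toNat (by omega)]
    simp
    omega

theorem pv_aloop_none (s : String) (ptg : List (String × String)) (sp : Bool) :
    ∀ (a U : Int), pvFindLoop s ptg sp (PySem.List.pyRange a U 1) = none →
      ∀ k, a ≤ k → k < U → ptg.any (fun kv => kv.1 == pvRegion s sp k) = false := by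
  intro a U
  have key : ∀ (n : Nat), ∀ (a : Int), (U - a).toNat ≤ n →
      pvFindLoop s ptg sp (PySem.List.pyRange a U 1) = none →
      ∀ k, a ≤ k → k < U → ptg.any (fun kv => kv.1 == pvRegion s sp k) = false := by
    intro n
    induction n with
    | zero => intro a h _ k hk1 hk2; omega
    | succ n ih =>
      intro a h hloop k hk1 hk2
      rw [PySem.List.pyRange_one_cons (by omega)] at hloop
      simp only [pvFindLoop] at hloop
      by_cases hq : ptg.any (fun kv => kv.1 == pvRegion s sp a) = true
      · simp [hq] at hloop
      · simp only [Bool.not_eq_true] at hq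
        simp only [hq, Bool.false_eq_true, if_false, ite_false] at hloop
        rcases eq_or_lt_of_le hk1 with rfl | hlt
        · exact hq
        · exact ih (a + 1) (by omega) hloop k (by omega) hk2
  exact key (U - a).toNat a le_rfl

theorem pv_aloop_some (s : String) (ptg : List (String × String)) (sp : Bool) :
    ∀ (a U : Int) (r : String), pvFindLoop s ptg sp (PySem.List.pyRange a U 1) = some r →
      ∃ k, a ≤ k ∧ k < U ∧ ptg.any (fun kv => kv.1 == pvRegion s sp k) = true ∧
        r = pvRegion s sp k ∧ ∀ j, a ≤ j → j < k → ptg.any (fun kv => kv.1 == pvRegion s sp j) = false := by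
  intro a U r
  have key : ∀ (n : Nat), ∀ (a : Int), (U - a).toNat ≤ n →
      pvFindLoop s ptg sp (PySem.List.pyRange a U 1) = some r →
      ∃ k, a ≤ k ∧ k < U ∧ ptg.any (fun kv => kv.1 == pvRegion s sp k) = true ∧
        r = pvRegion s sp k ∧ ∀ j, a ≤ j → j < k → ptg.any (fun kv => kv.1 == pvRegion s sp j) = false := by
    intro n
    induction n with
    | zero =>
      intro a h hloop
      rw [PySem.List.pyRange_one_eq_nil (by omega)] at hloop
      simp only [pvFindLoop] at hloop
      exact absurd hloop (by simp)
    | succ n ih =>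
      intro a h hloop
      by_cases haU : U ≤ a
      · rw [PySem.List.pyRange_one_eq_nil haU] at hloop
        simp only [pvFindLoop] at hloop
        exact absurd hloop (by simp)
      · rw [PySem.List.pyRange_one_cons (by omega)] at hloop
        simp only [pvFindLoop] at hloop
        by_cases hq : ptg.any (fun kv => kv.1 == pvRegion s sp a) = true
        · refine ⟨a, le_rfl, by omega, hq, ?_, ?_⟩
          · simp only [hq, if_true, ite_true, Option.some.injEq] at hloop
            exact hloop.symm
          · intro j hj1 hj2; omega
        · simp only [Bool.not_eq_true] at hq
          simp only [hq, Bool.false_eq_true, if_false, ite_false] at hloop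
          obtain ⟨k, hk1, hk2, hk3, hk4, hk5⟩ := ih (a + 1) (by omega) hloop
          refine ⟨k, by omega, hk2, hk3, hk4, ?_⟩
          intro j hj1 hj2
          rcases eq_or_lt_of_le hj1 with rfl | hlt
          · exact hq
          · exact hk5 j (by omega) hj2
  exact key (U - a).toNat a le_rfl

theorem pv_bfold (s : String) (ml Ml : Int) (sp : Bool) :
    ∀ (l : List (String × String)) (acc : Option String),
      (∀ a, acc = some a → pvOk s ml Ml sp a = true) →
      ((l.foldl (pvStep s ml Ml sp) acc = none → acc = none ∧ ∀ kv ∈ l, pvOk s ml Ml sp kv.1 = false) ∧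
       (∀ b, l.foldl (pvStep s ml Ml sp) acc = some b →
          pvOk s ml Ml sp b = true ∧
          (∀ kv ∈ l, pvOk s ml Ml sp kv.1 = true → PySem.Str.len b ≤ PySem.Str.len kv.1) ∧
          (∀ a, acc = some a → PySem.Str.len b ≤ PySem.Str.len a) ∧
          (b ∈ l.map Prod.fst ∨ acc = some b))) := by
  intro l
  induction l with
  | nil =>
    intro acc hacc
    refine ⟨?_, ?_⟩
    · intro h; exact ⟨h, by simp⟩
    · intro b hb
      refine ⟨hacc b hb, by simp, ?_, Or.inr hb⟩
      intro a ha
      rw [ha] at hb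
      simp at hb
      cases hb
      exact le_rfl
  | cons kv l ih =>
    intro acc hacc
    rw [List.foldl_cons, pv_step_eq]
    by_cases hok : pvOk s ml Ml sp kv.1 = true
    · simp only [hok, if_true, ite_true]
      obtain ⟨m, hm, hmok, hmle, hmacc, hmsrc⟩ :
          ∃ m, (match acc with
                | none => some kv.1
                | some b => if PySem.Str.len kv.1 < PySem.Str.len b then some kv.1 else acc) = some m ∧
            pvOk s ml Ml sp m = true ∧ PySem.Str.len m ≤ PySem.Str.len kv.1 ∧
            (∀ b0, acc = some b0 → PySem.Str.len m ≤ PySem.Str.len b0) ∧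
            (m = kv.1 ∨ acc = some m) := by
        cases acc with
        | none =>
          refine ⟨kv.1, rfl, hok, le_rfl, ?_, Or.inl rfl⟩
          intro b0 h
          exact nomatch h
        | some b0 =>
          by_cases hlt : PySem.Str.len kv.1 < PySem.Str.len b0
          · refine ⟨kv.1, ?_, hok, le_rfl,
              ⟨fun b1 h1 => by cases h1; exact le_of_lt hlt, Or.inl rfl⟩⟩
            show (if PySem.Str.len kv.1 < PySem.Str.len b0 then some kv.1 else some b0) = some kv.1
            rw [if_pos hlt]
          · refine ⟨b0, ?_, hacc b0 rfl, by omega,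
              ⟨fun b1 h1 => by cases h1; exact le_rfl, Or.inr rfl⟩⟩
            show (if PySem.Str.len kv.1 < PySem.Str.len b0 then some kv.1 else some b0) = some b0
            rw [if_neg hlt]
      rw [hm]
      obtain ⟨ihnone, ihsome⟩ := ih (some m) (by intro a ha; cases ha; exact hmok)
      refine ⟨?_, ?_⟩
      · intro hnone
        have h1 := (ihnone hnone).1
        cases h1
      · intro b hb
        obtain ⟨hbok, hbmin, hbacc, hbmem⟩ := ihsome b hb
        refine ⟨hbok, ?_, ?_, ?_⟩
        · intro kv' hkv' hok'
          rcases List.mem_cons.mp hkv' with rfl | hkv'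
          · exact le_trans (hbacc m rfl) hmle
          · exact hbmin kv' hkv' hok'
        · intro a ha
          exact le_trans (hbacc m rfl) (hmacc a ha)
        · rcases hbmem with hbl | hbacc'
          · exact Or.inl (by simp [hbl])
          · injection hbacc' with hmb
            subst hmb
            rcases hmsrc with rfl | hsrc
            · exact Or.inl (by simp)
            · exact Or.inr hsrc
    · simp only [Bool.not_eq_true] at hok
      simp only [hok, Bool.false_eq_true, if_false, ite_false]
      obtain ⟨ihnone, ihsome⟩ := ih acc hacc
      refine ⟨?_, ?_⟩
      · intro hnone
        obtain ⟨h1, h2⟩ := ihnone hnone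
        refine ⟨h1, ?_⟩
        intro kv' hkv'
        rcases List.mem_cons.mp hkv' with rfl | hkv'
        · exact hok
        · exact h2 kv' hkv'
      · intro b hb
        obtain ⟨h1, h2, h3, h4⟩ := ihsome b hb
        refine ⟨h1, ?_, h3, ?_⟩
        · intro kv' hkv' hok'
          rcases List.mem_cons.mp hkv' with rfl | hkv'
          · rw [hok] at hok'; cases hok'
          · exact h2 kv' hkv' hok'
        · rcases h4 with h4 | h4
          · exact Or.inl (by simp [h4])
          · exact Or.inr h4


theorem pv_tgt_len (s : String) (sp : Bool) (m : Nat) (h : m ≤ s.toList.length) :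
    (pvTgt s sp m).length = m := by
  have hL : s.toList.length = s.length := by simp
  unfold pvTgt
  cases sp <;> simp <;> omega

theorem pv_b_is_region (s : String) (ml Ml : Int) (sp : Bool) (b : String)
    (hpre : 1 ≤ ml) (hok : pvOk s ml Ml sp b = true) :
    b = pvRegion s sp (b.toList.length : Int) := by
  have h := (pv_ok_iff s ml Ml sp b).mp hok
  have hle := pv_ok_le s ml Ml sp b hok
  refine pv_str_toList_inj ?_
  rw [pv_region_toList s sp _ (by omega) (by omega)]
  simpa using h.2.2

theorem pv_q_of_mem (s : String) (ptg : List (String × String)) (sp : Bool) (k : Int) (b : String)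
    (hmem : b ∈ ptg.map Prod.fst) (hbr : b = pvRegion s sp k) :
    ptg.any (fun kv => kv.1 == pvRegion s sp k) = true := by
  obtain ⟨kv, hkv, hfst⟩ := List.mem_map.mp hmem
  rw [List.any_eq_true]
  refine ⟨kv, hkv, ?_⟩
  rw [show kv.1 = b from hfst, hbr]
  simp

theorem pv_ok_of_q (s : String) (ptg : List (String × String)) (ml Ml : Int) (sp : Bool) (k : Int)
    (hpre : 1 ≤ ml) (hml : ml ≤ k) (hMl : k ≤ Ml) (hkL : k ≤ (s.toList.length : Int))
    (hq : ptg.any (fun kv => kv.1 == pvRegion s sp k) = true) :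
    ∃ kv ∈ ptg, kv.1 = pvRegion s sp k ∧ pvOk s ml Ml sp kv.1 = true ∧
      ((kv.1.toList.length : Int) = k) := by
  obtain ⟨kv, hkv, heq⟩ := List.any_eq_true.mp hq
  have h1 : kv.1 = pvRegion s sp k := by simpa using heq
  have hlist : kv.1.toList = pvTgt s sp k.toNat := by
    rw [h1, pv_region_toList s sp k (by omega) hkL]
  have hlen : kv.1.toList.length = k.toNat := by
    rw [hlist, pv_tgt_len s sp k.toNat (by omega)]
  have hlen' : ((kv.1.toList.length : Nat) : Int) = k := by omega
  refine ⟨kv, hkv, h1, ?_, hlen'⟩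
  rw [pv_ok_iff]
  refine ⟨by omega, by omega, ?_⟩
  rw [hlist, pv_tgt_len s sp k.toNat (by omega)]

-- ===== VERDICT (by name: the statement is the Claim_ definition above) =====
theorem find_primer_in_sequence_optimized_spec : Claim_equal_find_primer_in_sequence_optimized := by
  intro s ptg ml Ml sp _ hpre
  unfold Pre_find_primer_in_sequence_optimized at hpre
  unfold Spec_find_primer_in_sequence_optimized
  unfold find_primer_in_sequence_optimized find_primer_in_sequence_optimized_alt
  obtain ⟨hfnone, hfsome⟩ := pv_bfold s ml Ml sp ptg none (fun a ha => nomatch ha)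
  by_cases hemp : s = ""
  · subst hemp
    rw [if_pos rfl]
    cases hB : ptg.foldl (pvStep "" ml Ml sp) none with
    | none => rfl
    | some b =>
      exfalso
      have hok := (hfsome b hB).1
      have hle := pv_ok_le "" ml Ml sp b hok
      have h := (pv_ok_iff "" ml Ml sp b).mp hok
      have h0 : ("" : String).toList.length = 0 := by simp
      have h1 := h.1
      omega
  · rw [if_neg hemp]
    have hslen : PySem.Str.len s = (s.toList.length : Int) := by simp
    set U := min (Ml + 1) (PySem.Str.len s + 1) with hU
    cases hA : pvFindLoop s ptg sp (PySem.List.pyRange ml U 1) with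
    | none =>
      have hnone := pv_aloop_none s ptg sp ml U hA
      cases hB : ptg.foldl (pvStep s ml Ml sp) none with
      | none => rfl
      | some b =>
        exfalso
        obtain ⟨hok, hmin, hacc0, hmem⟩ := hfsome b hB
        have hiff := (pv_ok_iff s ml Ml sp b).mp hok
        have hle := pv_ok_le s ml Ml sp b hok
        have hbreg := pv_b_is_region s ml Ml sp b hpre hok
        have hmem' : b ∈ ptg.map Prod.fst := by
          rcases hmem with h | h
          · exact h
          · exact nomatch h
        have hq := pv_q_of_mem s ptg sp (b.toList.length : Int) b hmem' hbreg
        have hkU : (b.toList.length : Int) < U := by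
          have h2 := hiff.2.1
          omega
        rw [hnone (b.toList.length : Int) hiff.1 hkU] at hq
        cases hq
    | some r =>
      obtain ⟨k, hk1, hk2, hq, hr, hminq⟩ := pv_aloop_some s ptg sp ml U r hA
      have hkMl : k ≤ Ml := by omega
      have hkL : k ≤ (s.toList.length : Int) := by omega
      obtain ⟨kv0, hkv0, hkv0r, hkv0ok, hkv0len⟩ :=
        pv_ok_of_q s ptg ml Ml sp k hpre hk1 hkMl hkL hq
      cases hB : ptg.foldl (pvStep s ml Ml sp) none with
      | none =>
        exfalso
        have hall := (hfnone hB).2 kv0 hkv0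
        rw [hkv0ok] at hall
        cases hall
      | some b =>
        obtain ⟨hok, hmin, hacc0, hmem⟩ := hfsome b hB
        have hmem' : b ∈ ptg.map Prod.fst := by
          rcases hmem with h | h
          · exact h
          · exact nomatch h
        have hiff := (pv_ok_iff s ml Ml sp b).mp hok
        have hleL := pv_ok_le s ml Ml sp b hok
        have hbreg := pv_b_is_region s ml Ml sp b hpre hok
        have hqb := pv_q_of_mem s ptg sp (b.toList.length : Int) b hmem' hbreg
        have hlb : PySem.Str.len b = (b.toList.length : Int) := by simp
        have hlkv0 : PySem.Str.len kv0.1 = (kv0.1.toList.length : Int) := by simp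
        have h1 : (b.toList.length : Int) ≤ k := by
          have := hmin kv0 hkv0 hkv0ok
          omega
        have h2 : ¬ (b.toList.length : Int) < k := by
          intro hlt
          rw [hminq (b.toList.length : Int) hiff.1 hlt] at hqb
          cases hqb
        have hkk : (b.toList.length : Int) = k := by omega
        rw [hr, hbreg, hkk]
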